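-- pv_equiv track=rewrite | github.com/RahulBrillio707/demo | Brillio IMP/code-translate-workflows-v3/code-translate-workflows-v3/conversion_workflow.py | split_overflow_chunks
-- ===== SOURCE A (Python) =====
-- def split_overflow_chunks(chunk_list: list, max_lines: int = 400) -> list:
--     result = []
--     logical_keywords = ("RUN;", "QUIT;", "%MEND;")
--
--     for chunk in chunk_list:
--         lines = chunk["code"].splitlines()
--         if len(lines) <= max_lines:
--             result.append(chunk)
--             continue
--
--         subchunks = []
--         start = 0
--         while start < len(lines):
--             end = min(start + max_lines, len(lines))
--             logical_end = -1
--             for i in range(end - 1, start - 1, -1):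
--                 if lines[i].strip().upper().endswith(logical_keywords):
--                     logical_end = i + 1
--                     break
--             if logical_end == -1 or logical_end <= start:
--                 logical_end = end
--             subchunk_lines = lines[start:logical_end]
--             subchunks.append("\n".join(subchunk_lines))
--             start = logical_end
--
--         for j, sub in enumerate(subchunks):
--             result.append({
--                 "id": f"{chunk['id']}_sub{j+1}",
--                 "code": sub.strip()
--             })
--
--     return result
-- ===== SOURCE B (Python) =====
-- def _cuts(n, max_lines, bounds):
--     # cut positions of the windows, computed from the precollected boundary list
--     cuts = []
--     start = 0
--     while start < n:
--         end = min(start + max_lines, n)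
--         best = start
--         for b in bounds:
--             if start < b <= end:
--                 best = b
--         cut = best if best > start else end
--         cuts.append(cut)
--         start = cut
--     return cuts
--
--
-- def _expand(chunk, max_lines):
--     lines = chunk["code"].splitlines()
--     if len(lines) <= max_lines:
--         return [chunk]
--     keywords = ("RUN;", "QUIT;", "%MEND;")
--     bounds = [i + 1 for i, line in enumerate(lines)
--               if any(line.strip().upper().endswith(k) for k in keywords)]
--     cuts = _cuts(len(lines), max_lines, bounds)
--     return [{"id": f"{chunk['id']}_sub{j + 1}",
--              "code": "\n".join(lines[s:c]).strip()}
--             for j, (s, c) in enumerate(zip([0] + cuts, cuts))]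
--
--
-- def split_overflow_chunks(chunk_list: list, max_lines: int = 400) -> list:
--     return [piece for chunk in chunk_list for piece in _expand(chunk, max_lines)]
-- ===== Notes on version B (the rewrite author's own statement) =====
-- stated objective: alternative
-- what changed: A is one accumulator loop over chunks whose oversized branch rescans each window backwards line-by-line for the last keyword boundary; B is a flat-map of a per-chunk expander that first collects all boundary positions in one forward pass, derives the list of cut positions from that index list (taking the last boundary inside each window), and emits the subchunks by zipping consecutive cuts.
import Mathlib
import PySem

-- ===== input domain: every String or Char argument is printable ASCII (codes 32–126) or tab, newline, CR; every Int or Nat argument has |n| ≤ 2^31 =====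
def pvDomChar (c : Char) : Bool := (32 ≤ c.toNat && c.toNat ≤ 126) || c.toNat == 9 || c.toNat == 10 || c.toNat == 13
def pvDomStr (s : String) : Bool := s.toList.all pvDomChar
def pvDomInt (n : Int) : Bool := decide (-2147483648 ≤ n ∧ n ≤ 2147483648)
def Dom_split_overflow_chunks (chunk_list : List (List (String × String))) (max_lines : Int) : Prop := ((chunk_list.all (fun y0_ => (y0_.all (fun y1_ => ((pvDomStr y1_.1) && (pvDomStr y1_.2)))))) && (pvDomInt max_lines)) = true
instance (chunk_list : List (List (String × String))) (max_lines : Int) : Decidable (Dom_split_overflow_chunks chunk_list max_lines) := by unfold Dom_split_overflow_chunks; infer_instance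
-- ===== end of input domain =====

-- B restructures A: instead of A's accumulator loop whose oversized branch rescans each window
-- backwards for the last keyword line, B flat-maps a per-chunk expander that collects all boundary
-- positions in one forward pass, derives the cut-position list from it, and zips consecutive cuts;
-- objective: alternative (each line is keyword-tested once, not once per overlapping window scan).

-- ===== PORT A =====

-- line.strip().upper().endswith(("RUN;", "QUIT;", "%MEND;"))
def pvIsBoundary (s : String) : Bool :=
  let t := PySem.Str.upper (PySem.Str.strip s)
  PySem.Str.endswith t "RUN;" || PySem.Str.endswith t "QUIT;" || PySem.Str.endswith t "%MEND;"

-- chunk[k] on the assoc list (first match); Python raises KeyError when absent — excluded by Pre_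
def pvKeyD (chunk : List (String × String)) (k : String) : String :=
  match chunk.find? (fun q => q.1 == k) with
  | some q => q.2
  | none => ""

-- for i in range(end-1, start-1, -1): break at the first boundary line; the argument k counts the
-- remaining indices, so i = start+k-1, …, start are tested in this (descending) order
def pvScanBack (lines : List String) (start : Int) : Nat → Int
  | 0 => -1
  | Nat.succ k =>
    if pvIsBoundary (PySem.List.pyGetD lines (start + k) "") then start + k + 1
    else pvScanBack lines start k

-- the while-loop of A, producing the subchunk strings; fuel = len(lines) suffices when max_lines ≥ 1
def pvLoopA (lines : List String) (m : Int) : Nat → Int → List String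
  | 0, _ => []
  | Nat.succ fuel, start =>
    if start < (lines.length : Int) then
      let e := min (start + m) (lines.length : Int)
      let r := pvScanBack lines start (e - start).toNat
      let le := if r = -1 ∨ r ≤ start then e else r
      PySem.Str.join "\n" (PySem.List.slice lines (some start) (some le)) :: pvLoopA lines m fuel le
    else []

-- body of A's 'for chunk in chunk_list' loop
def pvStepA (max_lines : Int) (result : List (List (String × String))) (chunk : List (String × String)) : List (List (String × String)) :=
  let lines := PySem.Str.splitlines (pvKeyD chunk "code")
  if (lines.length : Int) ≤ max_lines then result ++ [chunk]
  else
    let subchunks := pvLoopA lines max_lines lines.length 0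
    result ++ (PySem.List.enumerate subchunks).map (fun p =>
      [("id", PySem.Str.join "" [pvKeyD chunk "id", "_sub", PySem.Int.toStr (p.1 + 1)]),
       ("code", PySem.Str.strip p.2)])

def split_overflow_chunks (chunk_list : List (List (String × String))) (max_lines : Int) : List (List (String × String)) :=
  chunk_list.foldl (pvStepA max_lines) []

-- ===== PORT B =====

-- chunk[k], written as B's own first-match recursion
def pvLookup (k : String) : List (String × String) → String
  | [] => ""
  | q :: rest => if q.1 == k then q.2 else pvLookup k rest

-- any(line.strip().upper().endswith(kw) for kw in keywords)
def pvEndsLogical (line : String) : Bool :=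
  let t := PySem.Str.upper (PySem.Str.strip line)
  ["RUN;", "QUIT;", "%MEND;"].any (fun kw => PySem.Str.endswith t kw)

-- _cuts(n, max_lines, bounds): the cut position of each window, from the precollected boundary list
def pvCuts (n m : Int) (bs : List Int) : Nat → Int → List Int
  | 0, _ => []
  | Nat.succ fuel, start =>
    if start < n then
      let e := min (start + m) n
      let best := bs.foldl (fun acc b => if start < b && b ≤ e then b else acc) start
      let cut := if start < best then best else e
      cut :: pvCuts n m bs fuel cut
    else []

-- _expand(chunk, max_lines)
def pvExpand (m : Int) (chunk : List (String × String)) : List (List (String × String)) :=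
  let lines := PySem.Str.splitlines (pvLookup "code" chunk)
  if (lines.length : Int) ≤ m then [chunk]
  else
    let bounds := (PySem.List.enumerate lines).filterMap
      (fun p => if pvEndsLogical p.2 then some (p.1 + 1) else none)
    let cuts := pvCuts (lines.length : Int) m bounds lines.length 0
    (PySem.List.enumerate (((0 : Int) :: cuts).zip cuts)).map (fun p =>
      [("id", PySem.Str.join "" [pvLookup "id" chunk, "_sub", PySem.Int.toStr (p.1 + 1)]),
       ("code", PySem.Str.strip (PySem.Str.join "\n" (PySem.List.slice lines (some p.2.1) (some p.2.2))))])

def split_overflow_chunks_alt (chunk_list : List (List (String × String))) (max_lines : Int) : List (List (String × String)) :=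
  chunk_list.flatMap (pvExpand max_lines)

-- ===== PRECONDITION & SPEC =====
-- Pre_ excludes exactly the inputs on which A does not return normally: a chunk without a "code"
-- key (KeyError), an oversized chunk without an "id" key (KeyError), and an oversized non-empty
-- chunk with max_lines ≤ 0, on which A's while-loop never terminates.
def Pre_split_overflow_chunks (chunk_list : List (List (String × String))) (max_lines : Int) : Prop :=
  ∀ chunk ∈ chunk_list,
    (chunk.find? (fun q => q.1 == "code")).isSome = true ∧
    (max_lines < ((PySem.Str.splitlines (pvKeyD chunk "code")).length : Int) →
      0 < (PySem.Str.splitlines (pvKeyD chunk "code")).length →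
      1 ≤ max_lines ∧ (chunk.find? (fun q => q.1 == "id")).isSome = true)
instance (chunk_list : List (List (String × String))) (max_lines : Int) : Decidable (Pre_split_overflow_chunks chunk_list max_lines) := by unfold Pre_split_overflow_chunks; infer_instance

def pvWitness_split_overflow_chunks : (List (List (String × String))) × Int :=
  ([[("id", "a"), ("code", "x RUN;\ny\nz")]], 2)

def Spec_split_overflow_chunks (chunk_list : List (List (String × String))) (max_lines : Int) (out : List (List (String × String))) : Prop := out = split_overflow_chunks_alt chunk_list max_lines
instance (chunk_list : List (List (String × String))) (max_lines : Int) (out : List (List (String × String))) : Decidable (Spec_split_overflow_chunks chunk_list max_lines out) := by unfold Spec_split_overflow_chunks; infer_instance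

-- ===== CLAIM (what is proved, stated in full; the proofs are below) =====
def Claim_equal_split_overflow_chunks : Prop := ∀ (chunk_list : List (List (String × String))) (max_lines : Int), Dom_split_overflow_chunks chunk_list max_lines → Pre_split_overflow_chunks chunk_list max_lines → Spec_split_overflow_chunks chunk_list max_lines (split_overflow_chunks chunk_list max_lines)

-- ===== LEMMAS AND PROOFS =====

-- the boundary-position list both characterisations talk about
def pvBounds (lines : List String) : List Int :=
  (PySem.List.enumerate lines).filterMap (fun p => if pvIsBoundary p.2 then some (p.1 + 1) else none)

lemma pvLookup_eq (k : String) : ∀ chunk : List (String × String), pvLookup k chunk = pvKeyD chunk k := by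
  intro chunk
  induction chunk with
  | nil => rfl
  | cons q rest ih =>
    unfold pvLookup
    unfold pvKeyD
    rw [List.find?_cons]
    by_cases h : (q.1 == k) = true
    · rw [if_pos h, h]
    · have hf : (q.1 == k) = false := by simpa using h
      rw [if_neg h, hf]
      exact ih

lemma pvEnds_eq (s : String) : pvEndsLogical s = pvIsBoundary s := by
  simp only [pvEndsLogical, pvIsBoundary, List.any_cons, List.any_nil, Bool.or_false, Bool.or_assoc]

lemma pvBounds_sorted (lines : List String) : (pvBounds lines).Pairwise (· < ·) := by
  unfold pvBounds
  rw [List.pairwise_filterMap]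
  refine (PySem.List.pairwise_lt_enumerate lines 0).imp ?_
  intro p q h b hb b' hb'
  by_cases h1 : pvIsBoundary p.2 <;> by_cases h2 : pvIsBoundary q.2 <;>
    simp only [h1, h2, if_true, if_false, Option.some.injEq, reduceCtorEq] at hb hb'
  omega

lemma pvMem_bounds {lines : List String} {b : Int} :
    b ∈ pvBounds lines ↔ ∃ i : Nat, i < lines.length ∧ b = (i : Int) + 1 ∧ pvIsBoundary (lines.getD i "") = true := by
  unfold pvBounds
  simp only [List.mem_filterMap, PySem.List.mem_enumerate_iff]
  constructor
  · rintro ⟨p, ⟨k, hk, rfl⟩, hp⟩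
    by_cases h : pvIsBoundary lines[k]
    · simp only [h, if_true, Option.some.injEq] at hp
      exact ⟨k, hk, by omega, by rw [List.getD_eq_getElem lines "" hk]; exact h⟩
    · simp only [h, if_false, reduceCtorEq] at hp
  · rintro ⟨i, hi, rfl, hB⟩
    refine ⟨((0 : Int) + i, lines[i]), ⟨i, hi, rfl⟩, ?_⟩
    rw [List.getD_eq_getElem lines "" hi] at hB
    simp only [hB, if_true, Option.some.injEq]
    omega

lemma pvScanBack_char (lines : List String) (start : Int) (k : Nat) (h0 : 0 ≤ start)
    (hk : start + k ≤ (lines.length : Int)) :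
    (pvScanBack lines start k = -1 ∧ ∀ b ∈ pvBounds lines, ¬(start < b ∧ b ≤ start + k)) ∨
    (pvScanBack lines start k ∈ pvBounds lines ∧ start < pvScanBack lines start k ∧
     pvScanBack lines start k ≤ start + k ∧
     ∀ b ∈ pvBounds lines, start < b → b ≤ start + k → b ≤ pvScanBack lines start k) := by
  induction k with
  | zero =>
    left
    refine ⟨rfl, ?_⟩
    intro b _ hb
    omega
  | succ k ih =>
    have hidx : start + (k : Int) = ((start.toNat + k : Nat) : Int) := by omega
    have hlt : start.toNat + k < lines.length := by omega
    have hgd : PySem.List.pyGetD lines (start + (k : Int)) "" = lines.getD (start.toNat + k) "" := by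
      rw [hidx, PySem.List.pyGetD_natCast]
    have hkey : ∀ b ∈ pvBounds lines, b = start + (k : Int) + 1 →
        pvIsBoundary (lines.getD (start.toNat + k) "") = true := by
      intro b hb hbeq
      rcases pvMem_bounds.mp hb with ⟨i, hi, hbi, hIB⟩
      have hik : i = start.toNat + k := by omega
      exact hik ▸ hIB
    by_cases hB : pvIsBoundary (PySem.List.pyGetD lines (start + (k : Int)) "") = true
    · have hstep : pvScanBack lines start (k + 1) = start + (k : Int) + 1 := by
        show (if pvIsBoundary (PySem.List.pyGetD lines (start + (k : Int)) "") then start + (k : Int) + 1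
              else pvScanBack lines start k) = start + (k : Int) + 1
        rw [if_pos hB]
      right
      rw [hstep]
      refine ⟨pvMem_bounds.mpr ⟨start.toNat + k, hlt, by omega, hgd ▸ hB⟩, by omega,
        by push_cast; omega, ?_⟩
      intro b hb h1 h2
      push_cast at h2 ⊢
      omega
    · have hstep : pvScanBack lines start (k + 1) = pvScanBack lines start k := by
        show (if pvIsBoundary (PySem.List.pyGetD lines (start + (k : Int)) "") then start + (k : Int) + 1
              else pvScanBack lines start k) = pvScanBack lines start k
        rw [if_neg hB]
      have hBn : ¬ pvIsBoundary (lines.getD (start.toNat + k) "") = true := fun h => hB (hgd.symm ▸ h)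
      rcases ih (by omega) with ⟨h1, h2⟩ | ⟨m1, m2, m3, m4⟩
      · left
        rw [hstep]
        refine ⟨h1, ?_⟩
        intro b hb hcon
        rcases hcon with ⟨hgt, hle⟩
        by_cases hbe : b = start + (k : Int) + 1
        · exact hBn (hkey b hb hbe)
        · exact h2 b hb ⟨hgt, by push_cast at hle; omega⟩
      · right
        rw [hstep]
        refine ⟨m1, m2, by push_cast; omega, ?_⟩
        intro b hb h1' h2'
        by_cases hbe : b = start + (k : Int) + 1
        · exact absurd (hkey b hb hbe) hBn
        · exact m4 b hb h1' (by push_cast at h2'; omega)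

-- characterisation of B's 'for b in bounds: if start < b <= end: best = b' fold
lemma pvFoldBest_char (start e : Int) (bs : List Int) (hs : bs.Pairwise (· < ·)) :
    (bs.foldl (fun acc b => if start < b && b ≤ e then b else acc) start = start ∧
      ∀ b ∈ bs, ¬(start < b ∧ b ≤ e)) ∨
    (bs.foldl (fun acc b => if start < b && b ≤ e then b else acc) start ∈ bs ∧
      start < bs.foldl (fun acc b => if start < b && b ≤ e then b else acc) start ∧
      bs.foldl (fun acc b => if start < b && b ≤ e then b else acc) start ≤ e ∧
      ∀ b ∈ bs, start < b → b ≤ e → b ≤ bs.foldl (fun acc b => if start < b && b ≤ e then b else acc) start) := by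
  induction bs using List.reverseRecOn with
  | nil =>
    left
    exact ⟨rfl, by intro b hb; exact absurd hb List.not_mem_nil⟩
  | append_singleton bs b ih =>
    rw [List.pairwise_append] at hs
    have hlt : ∀ x ∈ bs, x < b := by
      intro x hx
      exact hs.2.2 x hx b List.mem_cons_self
    have hfold : (bs ++ [b]).foldl (fun acc b => if start < b && b ≤ e then b else acc) start =
        (if start < b && b ≤ e then b else bs.foldl (fun acc b => if start < b && b ≤ e then b else acc) start) := by
      rw [List.foldl_append, List.foldl_cons, List.foldl_nil]
    by_cases hP : start < b ∧ b ≤ e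
    · right
      rw [hfold, if_pos (by simp only [Bool.and_eq_true, decide_eq_true_eq]; exact hP)]
      refine ⟨List.mem_append_right _ List.mem_cons_self, hP.1, hP.2, ?_⟩
      intro x hx _ _
      rcases List.mem_append.mp hx with hx' | hx'
      · exact le_of_lt (hlt x hx')
      · rcases List.mem_singleton.mp hx' with rfl
        exact le_refl x
    · rw [hfold, if_neg (by simp only [Bool.and_eq_true, decide_eq_true_eq]; tauto)]
      rcases ih hs.1 with ⟨h1, h2⟩ | ⟨m1, m2, m3, m4⟩
      · left
        refine ⟨h1, ?_⟩
        intro x hx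
        rcases List.mem_append.mp hx with hx' | hx'
        · exact h2 x hx'
        · rcases List.mem_singleton.mp hx' with rfl
          exact hP
      · right
        refine ⟨List.mem_append_left _ m1, m2, m3, ?_⟩
        intro x hx h1' h2'
        rcases List.mem_append.mp hx with hx' | hx'
        · exact m4 x hx' h1' h2'
        · rcases List.mem_singleton.mp hx' with rfl
          exact absurd ⟨h1', h2'⟩ hP

-- A's backward window scan and B's best-boundary fold pick the same cut
lemma pvCut_eq (lines : List String) (start e : Int) (h0 : 0 ≤ start) (he1 : start < e)
    (he2 : e ≤ (lines.length : Int)) :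
    (if pvScanBack lines start (e - start).toNat = -1 ∨ pvScanBack lines start (e - start).toNat ≤ start
      then e else pvScanBack lines start (e - start).toNat) =
    (if start < (pvBounds lines).foldl (fun acc b => if start < b && b ≤ e then b else acc) start
      then (pvBounds lines).foldl (fun acc b => if start < b && b ≤ e then b else acc) start else e) := by
  have hek : start + (((e - start).toNat : Nat) : Int) = e := by omega
  have hA := pvScanBack_char lines start (e - start).toNat h0 (by omega)
  rw [hek] at hA
  have hB := pvFoldBest_char start e (pvBounds lines) (pvBounds_sorted lines)
  generalize hR : pvScanBack lines start ((e - start).toNat) = r at hA ⊢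
  generalize hF : (pvBounds lines).foldl (fun acc b => if start < b && b ≤ e then b else acc) start = f at hB ⊢
  rcases hA with ⟨hA1, hA2⟩ | ⟨hAm, hAgt, hAle, hAmax⟩
  · rcases hB with ⟨hB1, _⟩ | ⟨hBm, hBgt, hBle, _⟩
    · rw [if_pos (Or.inl hA1), hB1, if_neg (by omega)]
    · exact absurd ⟨hBgt, hBle⟩ (hA2 f hBm)
  · rcases hB with ⟨hB1, hB2⟩ | ⟨hBm, hBgt, hBle, hBmax⟩
    · exact absurd ⟨hAgt, hAle⟩ (hB2 r hAm)
    · have h1 : f ≤ r := hAmax f hBm hBgt hBle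
      have h2 : r ≤ f := hBmax r hAm hAgt hAle
      rw [if_neg (by omega : ¬(r = -1 ∨ r ≤ start)), if_pos hBgt]
      omega

-- with an empty window (e ≤ start) no boundary can satisfy start < b ≤ e, so the fold is inert
lemma pvFoldBest_trivial (start e : Int) (he : e ≤ start) : ∀ (bs : List Int) (acc : Int),
    bs.foldl (fun acc b => if start < b && b ≤ e then b else acc) acc = acc := by
  intro bs
  induction bs with
  | nil => intro acc; rfl
  | cons b rest ih =>
    intro acc
    rw [List.foldl_cons, if_neg (by simp only [Bool.and_eq_true, decide_eq_true_eq, not_and]; omega)]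
    exact ih acc

-- A's string-producing while-loop = slice-joins over B's consecutive cut pairs
lemma pvLoopA_eq_cuts (lines : List String) (m : Int) :
    ∀ (fuel : Nat) (start : Int), 0 ≤ start ∨ m ≤ 0 →
      pvLoopA lines m fuel start =
      (((start :: pvCuts (lines.length : Int) m (pvBounds lines) fuel start).zip
          (pvCuts (lines.length : Int) m (pvBounds lines) fuel start)).map
        (fun p => PySem.Str.join "\n" (PySem.List.slice lines (some p.1) (some p.2)))) := by
  intro fuel
  induction fuel with
  | zero => intro start _; rfl
  | succ fuel ih =>
    intro start h0or
    by_cases hs : start < (lines.length : Int)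
    case neg =>
      simp only [pvLoopA, pvCuts, if_neg hs, List.zip_nil_right, List.map_nil]
    case pos =>
      simp only [pvLoopA, pvCuts, if_pos hs]
      by_cases hm : start < min (start + m) (lines.length : Int)
      · have h0 : 0 ≤ start := by rcases h0or with h | h <;> omega
        have hcut := pvCut_eq lines start (min (start + m) (lines.length : Int)) h0 hm (by omega)
        rw [hcut]
        generalize hC : (if start < (pvBounds lines).foldl (fun acc b => if start < b && b ≤ min (start + m) (lines.length : Int) then b else acc) start
          then (pvBounds lines).foldl (fun acc b => if start < b && b ≤ min (start + m) (lines.length : Int) then b else acc) start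
          else min (start + m) (lines.length : Int)) = c
        have hc0 : 0 ≤ c := by
          rcases pvFoldBest_char start (min (start + m) (lines.length : Int)) (pvBounds lines) (pvBounds_sorted lines) with
            ⟨h1, _⟩ | ⟨_, h2, _, _⟩
          · rw [← hC, h1]
            split_ifs <;> omega
          · rw [← hC]
            split_ifs <;> omega
        rw [List.zip_cons_cons, List.map_cons, ih c (Or.inl hc0)]
      · -- start + m ≤ start: only reachable with m ≤ 0; both sides still agree step by step
        have hT : (min (start + m) (lines.length : Int) - start).toNat = 0 := by omega
        have hr : pvScanBack lines start (min (start + m) (lines.length : Int) - start).toNat = -1 := by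
          rw [hT]; rfl
        have hfold : (pvBounds lines).foldl (fun acc b => if start < b && b ≤ min (start + m) (lines.length : Int) then b else acc) start = start :=
          pvFoldBest_trivial start (min (start + m) (lines.length : Int)) (by omega) (pvBounds lines) start
        rw [hr, if_pos (Or.inl rfl)]
        rw [hfold]
        rw [if_neg (lt_irrefl start)]
        rw [List.zip_cons_cons, List.map_cons, ih (min (start + m) (lines.length : Int)) (Or.inr (by omega))]

lemma pvEnumerate_map {α β : Type} (h : α → β) : ∀ (xs : List α) (s : Int),
    PySem.List.enumerate (xs.map h) s = (PySem.List.enumerate xs s).map (fun p => (p.1, h p.2)) := by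
  intro xs
  induction xs with
  | nil => intro s; rfl
  | cons x xs ih =>
    intro s
    rw [List.map_cons, PySem.List.enumerate_cons, PySem.List.enumerate_cons, List.map_cons, ih]

-- per-chunk: A's loop-body effect = acc ++ B's expander (the Lean fuel ports agree even outside
-- Pre_; Pre_ is still needed because the PYTHON A raises or loops there)
lemma pvStep_eq (m : Int) (acc : List (List (String × String))) (chunk : List (String × String)) :
    pvStepA m acc chunk = acc ++ pvExpand m chunk := by
  have hlk : ∀ k, pvLookup k chunk = pvKeyD chunk k := fun k => pvLookup_eq k chunk
  simp only [pvStepA, pvExpand, hlk]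
  by_cases hn : ((PySem.Str.splitlines (pvKeyD chunk "code")).length : Int) ≤ m
  · rw [if_pos hn, if_pos hn]
  · rw [if_neg hn, if_neg hn]
    have hBnd : (PySem.List.enumerate (PySem.Str.splitlines (pvKeyD chunk "code"))).filterMap
        (fun p => if pvEndsLogical p.2 then some (p.1 + 1) else none) =
        pvBounds (PySem.Str.splitlines (pvKeyD chunk "code")) := by
      unfold pvBounds
      exact List.filterMap_congr (fun p _ => by rw [pvEnds_eq])
    rw [hBnd]
    rw [pvLoopA_eq_cuts (PySem.Str.splitlines (pvKeyD chunk "code")) m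
      (PySem.Str.splitlines (pvKeyD chunk "code")).length 0 (Or.inl (le_refl 0))]
    rw [pvEnumerate_map (fun p : Int × Int => PySem.Str.join "\n" (PySem.List.slice (PySem.Str.splitlines (pvKeyD chunk "code")) (some p.1) (some p.2))) (((0 : Int) :: pvCuts ((PySem.Str.splitlines (pvKeyD chunk "code")).length : Int) m (pvBounds (PySem.Str.splitlines (pvKeyD chunk "code"))) (PySem.Str.splitlines (pvKeyD chunk "code")).length 0).zip (pvCuts ((PySem.Str.splitlines (pvKeyD chunk "code")).length : Int) m (pvBounds (PySem.Str.splitlines (pvKeyD chunk "code"))) (PySem.Str.splitlines (pvKeyD chunk "code")).length 0)) 0, List.map_map]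
    rfl

lemma pvFold_flat (m : Int) : ∀ (cl acc : List (List (String × String))),
    cl.foldl (pvStepA m) acc = acc ++ cl.flatMap (pvExpand m) := by
  intro cl
  induction cl with
  | nil => intro acc; simp
  | cons chunk cl ih =>
    intro acc
    rw [List.foldl_cons, pvStep_eq m acc chunk, ih, List.flatMap_cons, List.append_assoc]

-- ===== VERDICT (by name: the statement is the Claim_ definition above) =====
theorem split_overflow_chunks_spec : Claim_equal_split_overflow_chunks := by
  intro cl m _ _
  unfold Spec_split_overflow_chunks split_overflow_chunks split_overflow_chunks_alt
  rw [pvFold_flat m cl [], List.nil_append]
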